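-- pv_equiv track=rewrite | github.com/MrMayow/filestoshamir | create.py | expand_rows
-- ===== SOURCE A (Python) =====
-- def expand_rows(all_subnames, per_top, top_order):
--     """
--     Создаёт строки для финального DataFrame:
--     - Первый столбец: 'Folder' — имя вложенной папки (подкаталога).
--     - Далее по столбцу на каждый top (в порядке top_order).
--     Правило множественных значений:
--       - Если у подкаталога в каком-то top несколько значений, создаются отдельные строки
--         только по этому столбцу; остальные столбцы заполняются пустыми, чтобы избежать
--         искусственного декартова произведения.
--     """
--     rows = []
--     for subname in sorted(all_subnames):
--         # Сначала найдём максимум числа значений среди топов для этого subname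
--         counts = []
--         per_col_values = []
--         for top_name in top_order:
--             vals = per_top.get(top_name, {}).get(subname, [])
--             per_col_values.append(vals)
--             counts.append(len(vals))
--         max_rows = max(counts) if counts else 1
--
--         # Если нигде нет значений вообще, всё равно сделаем одну строку с пустыми
--         if max_rows == 0:
--             max_rows = 1
--
--         for i in range(max_rows):
--             row = {'Folder': subname}
--             for top_name, vals in zip(top_order, per_col_values):
--                 row[top_name] = vals[i] if i < len(vals) else ''
--             rows.append(row)
--     return rows
-- ===== SOURCE B (Python) =====
-- def expand_rows(all_subnames, per_top, top_order):
--     """Head-stripping transpose: peel one value off every column per emitted row,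
--     instead of counting values and index-filling."""
--     rows = []
--     for subname in sorted(all_subnames):
--         cols = [per_top.get(t, {}).get(subname, []) for t in top_order]
--         if any(cols):
--             while any(cols):
--                 row = {'Folder': subname}
--                 rest = []
--                 for t, c in zip(top_order, cols):
--                     row[t] = c[0] if c else ''
--                     rest.append(c[1:])
--                 rows.append(row)
--                 cols = rest
--         else:
--             row = {'Folder': subname}
--             for t in top_order:
--                 row[t] = ''
--             rows.append(row)
--     return rows
-- ===== Notes on version B (the rewrite author's own statement) =====
-- stated objective: alternative
-- what changed: Per subname, B emits rows by a head-stripping transpose (peel the first value off every column while any column is nonempty, with a single blank row as fallback) instead of A's computing counts, max_rows and index-filling vals[i] for each row index.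
import Mathlib
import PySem

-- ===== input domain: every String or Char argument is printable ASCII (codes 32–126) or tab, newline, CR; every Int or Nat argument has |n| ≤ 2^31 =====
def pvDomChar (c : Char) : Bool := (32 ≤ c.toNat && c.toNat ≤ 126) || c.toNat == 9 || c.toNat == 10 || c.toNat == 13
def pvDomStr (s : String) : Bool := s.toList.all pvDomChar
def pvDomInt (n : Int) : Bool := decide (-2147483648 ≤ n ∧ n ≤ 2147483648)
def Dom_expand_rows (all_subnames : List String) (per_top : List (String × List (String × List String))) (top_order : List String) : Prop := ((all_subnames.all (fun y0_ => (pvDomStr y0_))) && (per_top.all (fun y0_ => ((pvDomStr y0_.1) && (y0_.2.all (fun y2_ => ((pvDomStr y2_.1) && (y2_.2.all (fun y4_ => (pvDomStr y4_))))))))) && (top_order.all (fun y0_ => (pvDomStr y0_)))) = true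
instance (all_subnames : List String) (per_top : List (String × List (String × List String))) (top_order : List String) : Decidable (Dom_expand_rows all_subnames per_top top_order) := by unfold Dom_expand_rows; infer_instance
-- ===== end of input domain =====

-- B replaces A's count-max-then-index-fill row construction by a head-stripping transpose
-- (peel one value off every column per emitted row); objective: alternative decomposition, same cost.

-- ===== PORT A =====
-- row i for one subname: {'Folder': subname} then row[t] = vals[i] if i < len(vals) else ''
def aRow (subname : String) (tops : List String) (cols : List (List String)) (i : Nat) : List (String × String) :=
  ((tops.zip cols).foldl
    (fun (row : PySem.Dict String String) p =>
      row.insert p.1 (if i < p.2.length then p.2.getD i "" else ""))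
    (PySem.Dict.empty.insert "Folder" subname)).items

def expand_rows (all_subnames : List String) (per_top : List (String × List (String × List String))) (top_order : List String) : List (List (String × String)) :=
  (PySem.List.sorted all_subnames (fun x => x) false).foldl
    (fun rows subname =>
      -- one pass over top_order collecting counts and per_col_values
      let cp := top_order.foldl
        (fun (acc : List Nat × List (List String)) t =>
          let vals := (PySem.Dict.mk ((PySem.Dict.mk per_top).getD t [])).getD subname []
          (acc.1 ++ [vals.length], acc.2 ++ [vals]))
        ([], [])
      let counts := cp.1
      let per_col_values := cp.2
      let max_rows0 := (PySem.List.max? counts (fun x => x)).getD 1   -- max(counts) if counts else 1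
      let max_rows := if max_rows0 = 0 then 1 else max_rows0
      (List.range max_rows).foldl
        (fun rows i => rows ++ [aRow subname top_order per_col_values i]) rows)
    []

-- ===== PORT B =====
-- one transposed row: {'Folder': subname} then row[t] = c[0] if c else ''
def bRow (subname : String) (tops : List String) (cols : List (List String)) : List (String × String) :=
  ((tops.zip cols).foldl
    (fun (row : PySem.Dict String String) p =>
      row.insert p.1 (match p.2 with | [] => "" | v :: _ => v))
    (PySem.Dict.empty.insert "Folder" subname)).items

-- the fallback blank row when no column has any value
def bBlank (subname : String) (tops : List String) : List (String × String) :=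
  (tops.foldl (fun (row : PySem.Dict String String) t => row.insert t "")
    (PySem.Dict.empty.insert "Folder" subname)).items

lemma pv_tail_sum_le (cols : List (List String)) :
    ((cols.map List.tail).map List.length).sum ≤ (cols.map List.length).sum := by
  induction cols with
  | nil => simp
  | cons c cs ih =>
    simp only [List.map_cons, List.sum_cons]
    have : c.tail.length ≤ c.length := by cases c <;> simp
    omega

lemma pv_tail_sum_lt (cols : List (List String))
    (h : cols.any (fun c => !c.isEmpty) = true) :
    ((cols.map List.tail).map List.length).sum < (cols.map List.length).sum := by
  induction cols with
  | nil => simp at h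
  | cons c cs ih =>
    simp only [List.map_cons, List.sum_cons]
    by_cases hc : c = []
    · subst hc
      have hcs : cs.any (fun c => !c.isEmpty) = true := by simpa using h
      have := ih hcs
      simpa using this
    · have h1 : c.tail.length < c.length := by
        cases c with
        | nil => exact absurd rfl hc
        | cons v vs => simp
      have h2 := pv_tail_sum_le cs
      omega

-- while any(cols): emit the heads row, continue on the tails
def bLoop (subname : String) (tops : List String) (cols : List (List String)) : List (List (String × String)) :=
  if h : cols.any (fun c => !c.isEmpty) = true then
    bRow subname tops cols :: bLoop subname tops (cols.map List.tail)
  else []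
termination_by (cols.map List.length).sum
decreasing_by simpa using pv_tail_sum_lt cols h

def expand_rows_alt (all_subnames : List String) (per_top : List (String × List (String × List String))) (top_order : List String) : List (List (String × String)) :=
  (PySem.List.sorted all_subnames (fun x => x) false).foldl
    (fun rows subname =>
      let cols := top_order.map
        (fun t => (PySem.Dict.mk ((PySem.Dict.mk per_top).getD t [])).getD subname [])
      rows ++ (if cols.any (fun c => !c.isEmpty) = true then bLoop subname top_order cols
               else [bBlank subname top_order]))
    []

-- ===== PRECONDITION & SPEC =====
def Spec_expand_rows (all_subnames : List String) (per_top : List (String × List (String × List String))) (top_order : List String) (out : List (List (String × String))) : Prop := out = expand_rows_alt all_subnames per_top top_order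
instance (all_subnames : List String) (per_top : List (String × List (String × List String))) (top_order : List String) (out : List (List (String × String))) : Decidable (Spec_expand_rows all_subnames per_top top_order out) := by unfold Spec_expand_rows; infer_instance

-- ===== CLAIM (what is proved, stated in full; the proofs are below) =====
def Claim_equal_expand_rows : Prop := ∀ (all_subnames : List String) (per_top : List (String × List (String × List String))) (top_order : List String), Dom_expand_rows all_subnames per_top top_order → Spec_expand_rows all_subnames per_top top_order (expand_rows all_subnames per_top top_order)

-- ===== LEMMAS AND PROOFS =====

-- the column height of a subname: max over the columns' lengths
def pvM (cols : List (List String)) : Nat := (cols.map List.length).foldr max 0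

lemma pvM_eq_zero_iff (cols : List (List String)) :
    pvM cols = 0 ↔ cols.any (fun c => !c.isEmpty) = false := by
  induction cols with
  | nil => simp [pvM]
  | cons c cs ih =>
    simp only [pvM, List.map_cons, List.foldr_cons] at *
    constructor
    · intro h
      have h1 : c.length = 0 := by omega
      have h2 : (cs.map List.length).foldr max 0 = 0 := by omega
      simp [List.any_cons, List.eq_nil_of_length_eq_zero h1, ih.mp h2]
    · intro h
      simp only [List.any_cons, Bool.or_eq_false_iff] at h
      have h1 : c = [] := by simpa using h.1
      have h2 := ih.mpr (by simpa using h.2)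
      subst h1; simp [h2]

lemma pvM_tail (cols : List (List String)) :
    pvM (cols.map List.tail) = pvM cols - 1 := by
  induction cols with
  | nil => simp [pvM]
  | cons c cs ih =>
    simp only [pvM, List.map_cons, List.foldr_cons] at *
    have hc : c.tail.length = c.length - 1 := by cases c <;> simp
    omega

lemma pv_foldl_max (l : List Nat) (a : Nat) :
    l.foldl max a = max a (l.foldr max 0) := by
  induction l generalizing a with
  | nil => simp
  | cons x xs ih => simp only [List.foldl_cons, List.foldr_cons, ih]; omega

-- A's max_rows is max 1 (pvM cols) when counts = cols.map List.length
lemma pv_max_rows_eq (tops : List String) (f : String → List String) :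
    (if (PySem.List.max? (tops.map fun t => (f t).length) (fun x => x)).getD 1 = 0 then 1
     else (PySem.List.max? (tops.map fun t => (f t).length) (fun x => x)).getD 1)
      = max 1 (pvM (tops.map f)) := by
  have hmap : tops.map (fun t => (f t).length) = (tops.map f).map List.length := by simp
  rw [hmap]
  cases hc : (tops.map f).map List.length with
  | nil => simp [pvM, hc, PySem.List.max?]
  | cons x xs =>
    simp only [PySem.List.max?_id_cons, Option.getD_some, pv_foldl_max, pvM, hc,
      List.foldr_cons]
    split <;> omega

-- the counts/per_col_values pair loop is a pair of maps
lemma pv_pair_fold (tops : List String) (f : String → List String)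
    (acc : List Nat × List (List String)) :
    tops.foldl (fun acc t => (acc.1 ++ [(f t).length], acc.2 ++ [f t])) acc
      = (acc.1 ++ tops.map (fun t => (f t).length), acc.2 ++ tops.map f) := by
  induction tops generalizing acc with
  | nil => simp
  | cons t ts ih => simp [ih]

-- B's heads row is A's row 0
lemma pv_row_zero (tops : List String) (cols : List (List String))
    (d : PySem.Dict String String) :
    (tops.zip cols).foldl
        (fun row p => row.insert p.1 (match p.2 with | [] => "" | v :: _ => v)) d
      = (tops.zip cols).foldl
        (fun row p => row.insert p.1 (if 0 < p.2.length then p.2.getD 0 "" else "")) d := by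
  have : (fun (row : PySem.Dict String String) (p : String × List String) =>
            row.insert p.1 (match p.2 with | [] => "" | v :: _ => v))
       = (fun row p => row.insert p.1 (if 0 < p.2.length then p.2.getD 0 "" else "")) := by
    funext row p
    cases p.2 <;> simp
  rw [this]

-- rows over the tails are rows at the next index
lemma pv_row_shift (tops : List String) (cols : List (List String)) (i : Nat)
    (d : PySem.Dict String String) :
    (tops.zip (cols.map List.tail)).foldl
        (fun row p => row.insert p.1 (if i < p.2.length then p.2.getD i "" else "")) d
      = (tops.zip cols).foldl
        (fun row p => row.insert p.1 (if i + 1 < p.2.length then p.2.getD (i + 1) "" else "")) d := by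
  induction tops generalizing cols d with
  | nil => simp
  | cons t ts ih =>
    cases cols with
    | nil => simp
    | cons c cs =>
      simp only [List.map_cons, List.zip_cons_cons, List.foldl_cons]
      rw [ih]
      congr 2
      cases c with
      | nil => simp
      | cons v vs => simp

lemma pv_aRow_tail (subname : String) (tops : List String) (cols : List (List String)) (i : Nat) :
    aRow subname tops (cols.map List.tail) i = aRow subname tops cols (i + 1) := by
  unfold aRow
  rw [pv_row_shift]

-- the blank fallback fold equals A's row-0 fold when every column is empty
lemma pv_blank_fold (tops : List String) :
    ∀ (cols : List (List String)) (d : PySem.Dict String String),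
      cols.length = tops.length → (∀ c ∈ cols, c = []) →
      tops.foldl (fun row t => row.insert t "") d
        = (tops.zip cols).foldl
            (fun row p => row.insert p.1 (if 0 < p.2.length then p.2.getD 0 "" else "")) d := by
  induction tops with
  | nil => intro cols d _ _; simp
  | cons t ts ih =>
    intro cols d hlen hemp
    cases cols with
    | nil => simp at hlen
    | cons c cs =>
      have hc : c = [] := hemp c (by simp)
      subst hc
      simp only [List.zip_cons_cons, List.foldl_cons]
      rw [show (if 0 < ([]:List String).length then ([]:List String).getD 0 "" else "") = "" from rfl]
      exact ih cs _ (by simpa using hlen) (fun c hm => hemp c (by simp [hm]))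

-- the blank fallback row is A's row 0 when every column is empty
lemma pv_blank_row (subname : String) (tops : List String) (cols : List (List String))
    (hlen : cols.length = tops.length) (hemp : ∀ c ∈ cols, c = []) :
    bBlank subname tops = aRow subname tops cols 0 := by
  unfold bBlank aRow
  congr 1
  exact pv_blank_fold tops cols _ hlen hemp

-- the head-stripping loop enumerates A's rows 0 .. pvM cols - 1
lemma pv_bLoop_eq (subname : String) (tops : List String) :
    ∀ (n : Nat) (cols : List (List String)), pvM cols = n →
      bLoop subname tops cols = (List.range n).map (aRow subname tops cols) := by
  intro n
  induction n with
  | zero =>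
    intro cols h
    rw [bLoop.eq_def]
    simp [(pvM_eq_zero_iff cols).mp h]
  | succ m ih =>
    intro cols h
    have hany : cols.any (fun c => !c.isEmpty) = true := by
      by_contra hfalse
      have := (pvM_eq_zero_iff cols).mpr (by simpa using hfalse)
      omega
    rw [bLoop.eq_def]
    simp only [hany, dif_pos]
    have htail : pvM (cols.map List.tail) = m := by rw [pvM_tail, h]; omega
    rw [ih (cols.map List.tail) htail]
    rw [List.range_succ_eq_map]
    simp only [List.map_cons, List.map_map]
    congr 1
    · unfold bRow aRow
      congr 1
      exact pv_row_zero tops cols _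
    · apply List.map_congr_left
      intro i _
      simp only [Function.comp_apply]
      rw [pv_aRow_tail]

-- per-subname: A's index-filled rows = B's transposed rows (with fallback)
lemma pv_per_subname (subname : String) (tops : List String) (f : String → List String) :
    (List.range (max 1 (pvM (tops.map f)))).map (aRow subname tops (tops.map f))
      = (if (tops.map f).any (fun c => !c.isEmpty) = true
         then bLoop subname tops (tops.map f) else [bBlank subname tops]) := by
  by_cases h0 : pvM (tops.map f) = 0
  · have hany := (pvM_eq_zero_iff (tops.map f)).mp h0
    have hemp : ∀ c ∈ tops.map f, c = [] := by
      intro c hm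
      have h' : ¬ (!c.isEmpty) = true := List.any_eq_false.mp hany c hm
      simpa using h' 
    rw [h0, hany]
    have hmax : max 1 0 = 1 := by omega
    rw [hmax]
    simp only [Bool.false_eq_true, if_false, List.range_one, List.map_cons, List.map_nil]
    rw [pv_blank_row subname tops (tops.map f) (by simp) hemp]
  · have hany : (tops.map f).any (fun c => !c.isEmpty) = true := by
      by_contra hfalse
      exact h0 ((pvM_eq_zero_iff (tops.map f)).mpr (by simpa using hfalse))
    rw [hany]
    simp only [if_true]
    rw [pv_bLoop_eq subname tops (pvM (tops.map f)) (tops.map f) rfl,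
      show max 1 (pvM (tops.map f)) = pvM (tops.map f) by omega]

-- A's inner range loop appends exactly its rows
lemma pv_inner_loop (subname : String) (tops : List String) (cols : List (List String))
    (m : Nat) (rows : List (List (String × String))) :
    (List.range m).foldl (fun rows i => rows ++ [aRow subname tops cols i]) rows
      = rows ++ (List.range m).map (aRow subname tops cols) := by
  exact PySem.List.foldl_append_singleton_eq_map _ _ _

-- ===== VERDICT (by name: the statement is the Claim_ definition above) =====
theorem expand_rows_spec : Claim_equal_expand_rows := by
  intro all_subnames per_top top_order _
  unfold Spec_expand_rows expand_rows expand_rows_alt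
  have hbody : (fun (rows : List (List (String × String))) (subname : String) =>
      let cp := top_order.foldl
        (fun (acc : List Nat × List (List String)) t =>
          let vals := (PySem.Dict.mk ((PySem.Dict.mk per_top).getD t [])).getD subname []
          (acc.1 ++ [vals.length], acc.2 ++ [vals]))
        ([], [])
      let counts := cp.1
      let per_col_values := cp.2
      let max_rows0 := (PySem.List.max? counts (fun x => x)).getD 1
      let max_rows := if max_rows0 = 0 then 1 else max_rows0
      (List.range max_rows).foldl
        (fun rows i => rows ++ [aRow subname top_order per_col_values i]) rows)
      = (fun rows subname =>
      let cols := top_order.map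
        (fun t => (PySem.Dict.mk ((PySem.Dict.mk per_top).getD t [])).getD subname [])
      rows ++ (if cols.any (fun c => !c.isEmpty) = true then bLoop subname top_order cols
               else [bBlank subname top_order])) := by
    funext rows subname
    simp only
    rw [pv_pair_fold top_order
      (fun t => (PySem.Dict.mk ((PySem.Dict.mk per_top).getD t [])).getD subname []) ([], [])]
    simp only [List.nil_append]
    rw [pv_inner_loop]
    rw [pv_max_rows_eq]
    rw [pv_per_subname]
  rw [hbody]
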